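-- pv_equiv track=rewrite | github.com/rayzxu/claw-code | rust/crates/plugins/bundled/material-fact-lookup/tools/material_facts_lookup_lib.py | pick_qdrant_payload
-- ===== SOURCE A (Python) =====
-- from typing import Any
--
-- def pick_qdrant_payload(item: dict[str, Any]) -> tuple[dict[str, Any], str | None]:
--     for key in ("payload", "merged_payload"):
--         candidate = item.get(key)
--         if isinstance(candidate, dict) and candidate:
--             return candidate, key
--     for key in ("payload", "merged_payload"):
--         candidate = item.get(key)
--         if isinstance(candidate, dict):
--             return candidate, key
--     return {}, None
-- ===== SOURCE B (Python) =====
-- def pick_qdrant_payload(item):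
--     fallback = None
--     for key in ("payload", "merged_payload"):
--         candidate = item.get(key)
--         if isinstance(candidate, dict):
--             if candidate:
--                 return candidate, key
--             if fallback is None:
--                 fallback = (candidate, key)
--     return fallback if fallback is not None else ({}, None)
-- ===== Notes on version B (the rewrite author's own statement) =====
-- stated objective: simpler
-- what changed: Replaces A's two sequential scans over the key tuple with a single pass that returns the first non-empty dict immediately and records the first empty dict as a fallback, returned after the loop.
import Mathlib
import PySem

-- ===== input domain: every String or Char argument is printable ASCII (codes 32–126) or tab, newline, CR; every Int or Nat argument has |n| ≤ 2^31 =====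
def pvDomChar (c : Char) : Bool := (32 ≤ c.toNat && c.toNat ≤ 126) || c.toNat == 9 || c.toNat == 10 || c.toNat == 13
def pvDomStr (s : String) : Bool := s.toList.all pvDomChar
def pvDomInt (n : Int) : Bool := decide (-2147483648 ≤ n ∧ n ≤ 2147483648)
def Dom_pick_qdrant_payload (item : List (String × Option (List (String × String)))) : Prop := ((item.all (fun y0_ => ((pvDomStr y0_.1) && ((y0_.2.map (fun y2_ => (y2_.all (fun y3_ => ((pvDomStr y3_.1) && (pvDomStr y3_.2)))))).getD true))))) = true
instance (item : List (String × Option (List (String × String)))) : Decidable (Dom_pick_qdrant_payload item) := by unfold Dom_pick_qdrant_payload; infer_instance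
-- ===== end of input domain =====

-- B: one pass over the keys keeping the first empty-dict fallback, instead of A's two scans (simpler decomposition).
-- ===== PORT A =====
-- first loop of A: return first key whose value is a non-empty dict
def pvA_first (item : List (String × Option (List (String × String)))) : List String → Option ((List (String × String)) × String)
  | [] => none
  | k :: ks =>
    match PySem.Dict.get? (PySem.Dict.mk item) k with
    | some (some l) => if l ≠ [] then some (l, k) else pvA_first item ks
    | _ => pvA_first item ks

-- second loop of A: return first key whose value is a dict (possibly empty)
def pvA_second (item : List (String × Option (List (String × String)))) : List String → Option ((List (String × String)) × String)
  | [] => none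
  | k :: ks =>
    match PySem.Dict.get? (PySem.Dict.mk item) k with
    | some (some l) => some (l, k)
    | _ => pvA_second item ks

def pick_qdrant_payload (item : List (String × Option (List (String × String)))) : (List (String × String)) × Option String :=
  match pvA_first item ["payload", "merged_payload"] with
  | some (l, k) => (l, some k)
  | none =>
    match pvA_second item ["payload", "merged_payload"] with
    | some (l, k) => (l, some k)
    | none => ([], none)

-- ===== PORT B =====
-- single loop carrying the fallback (first empty dict seen)
def pvB_loop (item : List (String × Option (List (String × String)))) (fb : Option ((List (String × String)) × String)) : List String → (List (String × String)) × Option String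
  | [] =>
    match fb with
    | some (l, k) => (l, some k)
    | none => ([], none)
  | k :: ks =>
    match PySem.Dict.get? (PySem.Dict.mk item) k with
    | some (some l) =>
      if l ≠ [] then (l, some k)
      else pvB_loop item (if fb.isNone then some (l, k) else fb) ks
    | _ => pvB_loop item fb ks

def pick_qdrant_payload_alt (item : List (String × Option (List (String × String)))) : (List (String × String)) × Option String :=
  pvB_loop item none ["payload", "merged_payload"]

-- ===== PRECONDITION & SPEC =====
def Spec_pick_qdrant_payload (item : List (String × Option (List (String × String)))) (out : (List (String × String)) × Option String) : Prop := out = pick_qdrant_payload_alt item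
instance (item : List (String × Option (List (String × String)))) (out : (List (String × String)) × Option String) : Decidable (Spec_pick_qdrant_payload item out) := by unfold Spec_pick_qdrant_payload; infer_instance

-- ===== CLAIM (what is proved, stated in full; the proofs are below) =====
def Claim_equal_pick_qdrant_payload : Prop := ∀ (item : List (String × Option (List (String × String)))), Dom_pick_qdrant_payload item → Spec_pick_qdrant_payload item (pick_qdrant_payload item)

-- ===== LEMMAS AND PROOFS =====

-- ===== VERDICT (by name: the statement is the Claim_ definition above) =====
theorem pick_qdrant_payload_spec : Claim_equal_pick_qdrant_payload := by
  intro item _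
  unfold Spec_pick_qdrant_payload pick_qdrant_payload pick_qdrant_payload_alt
  cases h1 : PySem.Dict.get? (PySem.Dict.mk item) "payload" with
  | none => cases h2 : PySem.Dict.get? (PySem.Dict.mk item) "merged_payload" with
    | none => simp [pvA_first, pvA_second, pvB_loop, h1, h2]
    | some v => cases v with
      | none => simp [pvA_first, pvA_second, pvB_loop, h1, h2]
      | some l => cases l <;> simp [pvA_first, pvA_second, pvB_loop, h1, h2]
  | some v1 => cases v1 with
    | none => cases h2 : PySem.Dict.get? (PySem.Dict.mk item) "merged_payload" with
      | none => simp [pvA_first, pvA_second, pvB_loop, h1, h2]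
      | some v => cases v with
        | none => simp [pvA_first, pvA_second, pvB_loop, h1, h2]
        | some l => cases l <;> simp [pvA_first, pvA_second, pvB_loop, h1, h2]
    | some l1 => cases l1 with
      | cons a t => simp [pvA_first, pvB_loop, h1]
      | nil => cases h2 : PySem.Dict.get? (PySem.Dict.mk item) "merged_payload" with
        | none => simp [pvA_first, pvA_second, pvB_loop, h1, h2]
        | some v => cases v with
          | none => simp [pvA_first, pvA_second, pvB_loop, h1, h2]
          | some l => cases l <;> simp [pvA_first, pvA_second, pvB_loop, h1, h2]
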